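-- pv_equiv track=rewrite | github.com/KseniiaRyzhova/Algorithms | heap.py | get_Heap_height
-- ===== SOURCE A (Python) =====
-- def get_Heap_height(arr):
--     height = 0
--     if len(arr) == 0: return 0
--     i = 0
--     while 2*i+1 <=len(arr):
--         height+=1
--         i+=1
--     return height
-- ===== SOURCE B (Python) =====
-- def get_Heap_height(arr):
--     n = len(arr)
--     return 0 if n == 0 else (n - 1) // 2 + 1
-- ===== Notes on version B (the rewrite author's own statement) =====
-- stated objective: faster
-- what changed: Replaced the O(n) index-doubling while loop with the closed form (n-1)//2 + 1 (0 for empty input).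
import Mathlib
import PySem

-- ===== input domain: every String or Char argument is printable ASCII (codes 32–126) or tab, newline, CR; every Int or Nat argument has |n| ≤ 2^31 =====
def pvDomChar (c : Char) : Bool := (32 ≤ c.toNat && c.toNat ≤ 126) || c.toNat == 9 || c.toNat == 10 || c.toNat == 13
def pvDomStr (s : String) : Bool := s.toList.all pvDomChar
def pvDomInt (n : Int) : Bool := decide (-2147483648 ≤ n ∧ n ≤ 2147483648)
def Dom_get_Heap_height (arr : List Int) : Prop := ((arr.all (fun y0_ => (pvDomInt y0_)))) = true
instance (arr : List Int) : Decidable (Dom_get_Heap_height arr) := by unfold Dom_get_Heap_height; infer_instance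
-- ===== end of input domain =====

-- B replaces A's O(n) counting loop with the closed form (n-1)//2 + 1 (0 for the empty list).


-- ===== PORT A =====
-- the 'while 2*i+1 <= len(arr)' loop, carrying (i, height); fuel = len(arr) only guards
-- termination (the loop exits on its own after at most len(arr) iterations: 2*i+1 > n once i ≥ n)
def heapHeightLoop (fuel : Nat) (n i height : Int) : Int :=
  match fuel with
  | 0 => height
  | fuel + 1 =>
    if 2 * i + 1 ≤ n then heapHeightLoop fuel n (i + 1) (height + 1) else height

def get_Heap_height (arr : List Int) : Int :=
  if (arr.length : Int) = 0 then 0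
  else heapHeightLoop arr.length (arr.length : Int) 0 0

-- ===== PORT B =====
def get_Heap_height_alt (arr : List Int) : Int :=
  let n : Int := arr.length
  if n = 0 then 0 else PySem.Int.floordiv (n - 1) 2 + 1

-- ===== PRECONDITION & SPEC =====
def Spec_get_Heap_height (arr : List Int) (out : Int) : Prop := out = get_Heap_height_alt arr
instance (arr : List Int) (out : Int) : Decidable (Spec_get_Heap_height arr out) := by unfold Spec_get_Heap_height; infer_instance

-- ===== CLAIM (what is proved, stated in full; the proofs are below) =====
def Claim_equal_get_Heap_height : Prop := ∀ (arr : List Int), Dom_get_Heap_height arr → Spec_get_Heap_height arr (get_Heap_height arr)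

-- ===== LEMMAS AND PROOFS =====
-- enough fuel: the loop's exit condition fires before fuel runs out
theorem heapHeightLoop_eq (fuel : Nat) : ∀ (i height n : Int), 0 ≤ i → n ≤ i + fuel →
    heapHeightLoop fuel n i height =
      if 2 * i + 1 ≤ n then height + ((n - 1) / 2 - i + 1) else height := by
  induction fuel with
  | zero =>
      intro i height n hi hf
      have : ¬ (2 * i + 1 ≤ n) := by omega
      simp [heapHeightLoop, this]
  | succ fuel ih =>
      intro i height n hi hf
      rw [heapHeightLoop]
      by_cases h : 2 * i + 1 ≤ n
      · rw [if_pos h, if_pos h, ih (i + 1) (height + 1) n (by omega) (by omega)]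
        split_ifs with h2 <;> omega
      · rw [if_neg h, if_neg h]

-- ===== VERDICT (by name: the statement is the Claim_ definition above) =====
theorem get_Heap_height_spec : Claim_equal_get_Heap_height := by
  intro arr _
  show get_Heap_height arr = get_Heap_height_alt arr
  unfold get_Heap_height get_Heap_height_alt
  simp only [PySem.Int.floordiv_eq_ediv_of_pos (by omega : (0:Int) < 2)]
  have h0 : (0:Int) ≤ (arr.length : Int) := Int.natCast_nonneg _
  rw [heapHeightLoop_eq arr.length 0 0 (arr.length : Int) (by omega) (by omega)]
  split_ifs <;> omega
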